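-- pv_equiv track=rewrite | github.com/ElmouhiYassine/Adder | HyTLConvolution/negation.py | bounds_uncertain_binary
-- ===== SOURCE A (Python) =====
-- def bounds_uncertain_binary(uvec_lsb: list[int], width: int) -> tuple[int, int]:
--     """
--     Returns (min, max) for an uncertain-binary vector.
--     -1 means definite 0
--      1 means definite 1
--      0 means uncertain {0,1}
--     """
--     vec = uvec_lsb + [-1] * (width - len(uvec_lsb))
--     mn = 0
--     mx = 0
--     for i, t in enumerate(vec[:width]):
--         if t == 1:
--             mn += (1 << i)
--             mx += (1 << i)
--         elif t == 0:
--             # could be 0 or 1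
--             mx += (1 << i)
--     return mn, mx
-- ===== SOURCE B (Python) =====
-- def bounds_uncertain_binary(uvec_lsb: list[int], width: int) -> tuple[int, int]:
--     """Horner variant: consume the effective bit vector from most-significant
--     position downward, building mn/mx by repeated doubling (no shifts/masks)."""
--     vec = (uvec_lsb + [-1] * (width - len(uvec_lsb)))[:width]
--     mn = 0
--     mx = 0
--     for t in reversed(vec):
--         mn = mn * 2 + (1 if t == 1 else 0)
--         mx = mx * 2 + (1 if t == 0 or t == 1 else 0)
--     return mn, mx
-- ===== Notes on version B (the rewrite author's own statement) =====
-- stated objective: alternative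
-- what changed: Replaces the LSB-first enumerate loop that adds 1<<i masks with an MSB-first Horner pass over the reversed effective vector, building both bounds by repeated doubling.
import Mathlib
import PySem

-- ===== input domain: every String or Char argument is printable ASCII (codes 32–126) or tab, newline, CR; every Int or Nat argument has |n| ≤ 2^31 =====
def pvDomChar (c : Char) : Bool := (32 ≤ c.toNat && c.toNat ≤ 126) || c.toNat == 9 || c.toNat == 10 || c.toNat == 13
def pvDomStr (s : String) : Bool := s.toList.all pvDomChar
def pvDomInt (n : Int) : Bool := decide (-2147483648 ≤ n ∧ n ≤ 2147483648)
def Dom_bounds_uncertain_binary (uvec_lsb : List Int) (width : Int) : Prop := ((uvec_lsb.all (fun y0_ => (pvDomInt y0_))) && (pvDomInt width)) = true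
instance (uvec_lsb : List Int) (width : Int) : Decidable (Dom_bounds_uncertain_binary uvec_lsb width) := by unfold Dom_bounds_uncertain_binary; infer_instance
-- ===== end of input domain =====

-- B replaces A's LSB-first enumerate loop adding 1<<i masks by an MSB-first Horner
-- pass over the reversed effective vector (repeated doubling); same cost, different decomposition.

-- ===== PORT A =====
def bounds_uncertain_binary (uvec_lsb : List Int) (width : Int) : Int × Int :=
  let vec := uvec_lsb ++ List.replicate (width - (uvec_lsb.length : Int)).toNat (-1 : Int)
  (PySem.List.enumerate (PySem.List.slice vec none (some width))).foldl
    (fun p it =>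
      if it.2 = 1 then (p.1 + (2 : Int) ^ it.1.toNat, p.2 + (2 : Int) ^ it.1.toNat)
      else if it.2 = 0 then (p.1, p.2 + (2 : Int) ^ it.1.toNat)
      else p) (0, 0)

-- ===== PORT B =====
def bounds_uncertain_binary_alt (uvec_lsb : List Int) (width : Int) : Int × Int :=
  let vec := PySem.List.slice (uvec_lsb ++ List.replicate (width - (uvec_lsb.length : Int)).toNat (-1 : Int)) none (some width)
  vec.reverse.foldl
    (fun p t =>
      (p.1 * 2 + (if t = 1 then 1 else 0), p.2 * 2 + (if t = 0 ∨ t = 1 then 1 else 0)))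
    (0, 0)

-- ===== PRECONDITION & SPEC =====
def Spec_bounds_uncertain_binary (uvec_lsb : List Int) (width : Int) (out : Int × Int) : Prop := out = bounds_uncertain_binary_alt uvec_lsb width
instance (uvec_lsb : List Int) (width : Int) (out : Int × Int) : Decidable (Spec_bounds_uncertain_binary uvec_lsb width out) := by unfold Spec_bounds_uncertain_binary; infer_instance

-- ===== CLAIM (what is proved, stated in full; the proofs are below) =====
def Claim_equal_bounds_uncertain_binary : Prop := ∀ (uvec_lsb : List Int) (width : Int), Dom_bounds_uncertain_binary uvec_lsb width → Spec_bounds_uncertain_binary uvec_lsb width (bounds_uncertain_binary uvec_lsb width)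

-- ===== LEMMAS AND PROOFS =====

-- LSB-first value of the minimum / maximum of a bit list (reference recursion)
def pvMn : List Int → Int
  | [] => 0
  | t :: l => (if t = 1 then 1 else 0) + 2 * pvMn l

def pvMx : List Int → Int
  | [] => 0
  | t :: l => (if t = 0 ∨ t = 1 then 1 else 0) + 2 * pvMx l

-- A's fold over `enumerate l s` adds 2^s ⋅ pvMn l / 2^s ⋅ pvMx l to the accumulator
lemma pvA_fold (l : List Int) : ∀ (s : Nat) (a b : Int),
    (PySem.List.enumerate l (s : Int)).foldl
      (fun p it =>
        if it.2 = 1 then (p.1 + (2 : Int) ^ it.1.toNat, p.2 + (2 : Int) ^ it.1.toNat)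
        else if it.2 = 0 then (p.1, p.2 + (2 : Int) ^ it.1.toNat)
        else p) (a, b)
    = (a + 2 ^ s * pvMn l, b + 2 ^ s * pvMx l) := by
  induction l with
  | nil => intro s a b; simp [PySem.List.enumerate_nil, pvMn, pvMx]
  | cons t l ih =>
    intro s a b
    rw [PySem.List.enumerate_cons]
    have hcast : (s : Int) + 1 = ((s + 1 : Nat) : Int) := by push_cast; ring
    simp only [List.foldl_cons, hcast, ih]
    have hs : ((s : Int)).toNat = s := Int.toNat_natCast s
    by_cases h1 : t = 1
    · simp [h1, hs, pvMn, pvMx, pow_succ]; constructor <;> ring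
    · by_cases h0 : t = 0
      · simp [h0, hs, pvMn, pvMx, pow_succ]; constructor <;> ring
      · simp [h0, h1, pvMn, pvMx, pow_succ]; constructor <;> ring

-- B's Horner fold over the reversed list computes the same pair, scaled by 2^len
lemma pvB_fold (l : List Int) : ∀ (a b : Int),
    l.reverse.foldl
      (fun p t =>
        (p.1 * 2 + (if t = 1 then 1 else 0), p.2 * 2 + (if t = 0 ∨ t = 1 then 1 else 0)))
      (a, b)
    = (a * 2 ^ l.length + pvMn l, b * 2 ^ l.length + pvMx l) := by
  induction l with
  | nil => intro a b; simp [pvMn, pvMx]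
  | cons t l ih =>
    intro a b
    simp only [List.reverse_cons, List.foldl_append, List.foldl_cons, List.foldl_nil, ih]
    simp [pvMn, pvMx, pow_succ]
    constructor <;> ring

-- A's fold starting at index 0 and B's Horner fold agree on any bit list
lemma pv_main (l : List Int) :
    (PySem.List.enumerate l).foldl
      (fun p it =>
        if it.2 = 1 then (p.1 + (2 : Int) ^ it.1.toNat, p.2 + (2 : Int) ^ it.1.toNat)
        else if it.2 = 0 then (p.1, p.2 + (2 : Int) ^ it.1.toNat)
        else p) (0, 0)
    = l.reverse.foldl
      (fun p t =>
        (p.1 * 2 + (if t = 1 then 1 else 0), p.2 * 2 + (if t = 0 ∨ t = 1 then 1 else 0)))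
      (0, 0) := by
  have hA := pvA_fold l 0 0 0
  have hB := pvB_fold l 0 0
  simp only [Nat.cast_zero, pow_zero, one_mul, zero_add] at hA
  simp only [zero_mul, zero_add] at hB
  exact hA.trans hB.symm

-- ===== VERDICT (by name: the statement is the Claim_ definition above) =====
theorem bounds_uncertain_binary_spec : Claim_equal_bounds_uncertain_binary := by
  intro uvec_lsb width _
  unfold Spec_bounds_uncertain_binary bounds_uncertain_binary bounds_uncertain_binary_alt
  exact pv_main _
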